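-- pv_equiv track=rewrite | github.com/ChunBoo/JustUK | 342-countOfSubListInRange.py | foo
-- ===== SOURCE A (Python) =====
-- def foo(nums,L,R):
--     def f(upperBound):
--         cur=ans=0
--         for i in nums:
--             if i<=upperBound:
--                 cur+=1
--             else:
--                 cur=0
--             ans+=cur
--         return ans
--     h=f(R)
--     l=f(L-1)
--     return f(R)-f(L-1)
-- ===== SOURCE B (Python) =====
-- def foo(nums, L, R):
--     # For each end index i, valid start positions s are those with
--     # last_over < s <= last_ge: the window contains no element > R and
--     # at least one element >= L.  Tracks boundary POSITIONS, one pass.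
--     ans = 0
--     last_over = last_ge = -1
--     for i, x in enumerate(nums):
--         if x > R:
--             last_over = i
--         if x >= L:
--             last_ge = i
--         ans += last_ge - last_over
--     return ans
-- ===== Notes on version B (the rewrite author's own statement) =====
-- stated objective: faster
-- what changed: B uses the last-boundary-position algorithm: one pass tracking the last index of an element > R and the last index of an element >= L, adding per position the count of valid start indices (last_ge - last_over), instead of A's inclusion-exclusion of two full run-length scans f(R) and f(L-1) (each computed twice) followed by a subtraction.
import Mathlib
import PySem

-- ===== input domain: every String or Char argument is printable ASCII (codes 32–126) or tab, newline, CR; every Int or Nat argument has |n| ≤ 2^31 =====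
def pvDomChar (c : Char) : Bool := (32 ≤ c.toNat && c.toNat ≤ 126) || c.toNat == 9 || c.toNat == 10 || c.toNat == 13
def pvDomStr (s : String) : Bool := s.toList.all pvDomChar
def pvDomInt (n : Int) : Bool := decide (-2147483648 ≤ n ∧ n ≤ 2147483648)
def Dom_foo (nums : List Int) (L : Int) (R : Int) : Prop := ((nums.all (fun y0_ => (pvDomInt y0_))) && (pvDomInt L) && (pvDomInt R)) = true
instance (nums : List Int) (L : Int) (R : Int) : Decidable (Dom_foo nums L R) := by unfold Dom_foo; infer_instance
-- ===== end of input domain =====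

-- B replaces A's inclusion-exclusion of two run-length scans (each computed twice) with a
-- single pass over positions tracking the last index > R and the last index >= L.

-- ===== PORT A =====
-- inner helper f: fold over nums with state (cur, ans)
def fooF (ub : Int) : List Int → Int × Int → Int × Int
  | [], s => s
  | i :: t, (cur, ans) =>
    let cur' := if i ≤ ub then cur + 1 else 0
    fooF ub t (cur', ans + cur')

def foo (nums : List Int) (L : Int) (R : Int) : Int :=
  let f : Int → Int := fun ub => (fooF ub nums (0, 0)).2
  let _h := f R
  let _l := f (L - 1)
  f R - f (L - 1)

-- ===== PORT B =====
-- single pass with the running index i and the last boundary positions (lastOver, lastGe)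
def fooBF (L R : Int) : List Int → Int → Int × Int × Int → Int
  | [], _, s => s.2.2
  | x :: t, i, (lo, ge, ans) =>
    let lo' := if R < x then i else lo
    let ge' := if L ≤ x then i else ge
    fooBF L R t (i + 1) (lo', ge', ans + (ge' - lo'))

def foo_alt (nums : List Int) (L : Int) (R : Int) : Int :=
  fooBF L R nums 0 (-1, -1, 0)

-- ===== PRECONDITION & SPEC =====
def Spec_foo (nums : List Int) (L : Int) (R : Int) (out : Int) : Prop := out = foo_alt nums L R
instance (nums : List Int) (L : Int) (R : Int) (out : Int) : Decidable (Spec_foo nums L R out) := by unfold Spec_foo; infer_instance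

-- ===== CLAIM (what is proved, stated in full; the proofs are below) =====
def Claim_equal_foo : Prop := ∀ (nums : List Int) (L : Int) (R : Int), Dom_foo nums L R → Spec_foo nums L R (foo nums L R)

-- ===== LEMMAS AND PROOFS =====
-- Invariant: B's position-based pass equals the difference of A's two run-length scans,
-- where the current run of elements ≤ R (resp. ≤ L-1) ending just before index i is
-- i - 1 - lastOver (resp. i - 1 - lastGe), for arbitrary accumulators.
theorem fooBF_eq (L R : Int) : ∀ (t : List Int) (i lo ge ans ah al : Int),
    fooBF L R t i (lo, ge, ans)
      = ans + ((fooF R t (i - 1 - lo, ah)).2 - ah)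
            - ((fooF (L - 1) t (i - 1 - ge, al)).2 - al) := by
  intro t
  induction t with
  | nil => intro i lo ge ans ah al; simp [fooBF, fooF]
  | cons x t ih =>
    intro i lo ge ans ah al
    simp only [fooBF, fooF]
    have hR : (if x ≤ R then (i - 1 - lo) + 1 else 0)
        = (i + 1) - 1 - (if R < x then i else lo) := by split_ifs <;> omega
    have hL : (if x ≤ L - 1 then (i - 1 - ge) + 1 else 0)
        = (i + 1) - 1 - (if L ≤ x then i else ge) := by split_ifs <;> omega
    rw [hR, hL, ih (i + 1) (if R < x then i else lo) (if L ≤ x then i else ge) _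
          (ah + ((i + 1) - 1 - (if R < x then i else lo)))
          (al + ((i + 1) - 1 - (if L ≤ x then i else ge)))]
    ring

-- ===== VERDICT (by name: the statement is the Claim_ definition above) =====
theorem foo_spec : Claim_equal_foo := by
  intro nums L R _
  unfold Spec_foo foo foo_alt
  rw [fooBF_eq L R nums 0 (-1) (-1) 0 0 0]
  ring
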